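-- pv_equiv track=rewrite | github.com/drcarademono/beautiful-cities | WorldData/fix-builds.py | get_vanilla_building_data
-- ===== SOURCE A (Python) =====
-- def get_vanilla_building_data(vanilla_buildings):
--     """Extract NameSeed, Quality, and Sector from vanilla buildings."""
--     name_seed_list = {}
--     quality_list = {}
--     sector_list = {}
--     for building in vanilla_buildings:
--         building_type = building.get('BuildingType')
--         name_seed = building.get('NameSeed')
--         quality = building.get('Quality')
--         sector = building.get('Sector')
--         if building_type is not None:
--             if building_type not in name_seed_list:
--                 name_seed_list[building_type] = []
--                 quality_list[building_type] = []
--                 sector_list[building_type] = []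
--             if name_seed is not None:
--                 name_seed_list[building_type].append(name_seed)
--             if quality is not None:
--                 quality_list[building_type].append(quality)
--             if sector is not None:
--                 sector_list[building_type].append(sector)
--     return name_seed_list, quality_list, sector_list
-- ===== SOURCE B (Python) =====
-- def get_vanilla_building_data(vanilla_buildings):
--     """Extract NameSeed, Quality, and Sector from vanilla buildings."""
--     # Phase 1: group the typed buildings by BuildingType (first-appearance key order).
--     groups = {}
--     for building in vanilla_buildings:
--         building_type = building.get('BuildingType')
--         if building_type is not None:
--             groups.setdefault(building_type, []).append(building)
--     # Phase 2: per type, collect each field from the grouped buildings.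
--     name_seed_list = {}
--     quality_list = {}
--     sector_list = {}
--     for building_type, group in groups.items():
--         name_seed_list[building_type] = [
--             b['NameSeed'] for b in group if b.get('NameSeed') is not None]
--         quality_list[building_type] = [
--             b['Quality'] for b in group if b.get('Quality') is not None]
--         sector_list[building_type] = [
--             b['Sector'] for b in group if b.get('Sector') is not None]
--     return name_seed_list, quality_list, sector_list
-- ===== Notes on version B (the rewrite author's own statement) =====
-- stated objective: alternative
-- what changed: B first builds one ordered grouping dict from BuildingType to the list of buildings of that type, then derives the three result dicts by a per-type comprehension pass, instead of A's single loop that interleaves the maintenance of three dicts.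
import Mathlib
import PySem

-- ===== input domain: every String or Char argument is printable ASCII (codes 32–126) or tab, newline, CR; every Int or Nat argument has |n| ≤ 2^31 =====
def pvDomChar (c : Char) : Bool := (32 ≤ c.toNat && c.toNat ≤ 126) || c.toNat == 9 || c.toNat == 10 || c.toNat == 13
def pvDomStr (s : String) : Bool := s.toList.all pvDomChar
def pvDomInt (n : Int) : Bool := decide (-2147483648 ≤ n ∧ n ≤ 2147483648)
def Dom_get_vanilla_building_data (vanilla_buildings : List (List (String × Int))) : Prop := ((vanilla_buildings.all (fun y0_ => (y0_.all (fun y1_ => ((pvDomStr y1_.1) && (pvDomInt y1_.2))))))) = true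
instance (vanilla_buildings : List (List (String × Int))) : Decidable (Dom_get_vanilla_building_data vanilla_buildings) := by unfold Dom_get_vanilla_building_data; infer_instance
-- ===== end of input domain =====

-- B regroups the work: one grouping dict BuildingType ↦ its buildings, then a per-type
-- comprehension pass per field, instead of A's single loop maintaining three dicts at once.

-- building.get(k) on a dict passed in as an association list (last binding wins, as in dict(pairs))
def pvGet (b : List (String × Int)) (k : String) : Option Int :=
  (PySem.Dict.ofList b).get? k

-- ===== PORT A =====
-- A's loop body, factored out of the fold
def pvStepA (st : PySem.Dict Int (List Int) × PySem.Dict Int (List Int) × PySem.Dict Int (List Int))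
    (building : List (String × Int)) :
    PySem.Dict Int (List Int) × PySem.Dict Int (List Int) × PySem.Dict Int (List Int) :=
  match pvGet building "BuildingType" with
  | none => st
  | some t =>
    let st1 := if st.1.contains t then st
               else (st.1.insert t [], st.2.1.insert t [], st.2.2.insert t [])
    let ns := match pvGet building "NameSeed" with
              | some v => st1.1.modify t [] (· ++ [v])
              | none => st1.1
    let q := match pvGet building "Quality" with
             | some v => st1.2.1.modify t [] (· ++ [v])
             | none => st1.2.1
    let se := match pvGet building "Sector" with
              | some v => st1.2.2.modify t [] (· ++ [v])
              | none => st1.2.2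
    (ns, q, se)

def get_vanilla_building_data (vanilla_buildings : List (List (String × Int))) : (List (Int × List Int)) × (List (Int × List Int)) × (List (Int × List Int)) :=
  let st := vanilla_buildings.foldl pvStepA (PySem.Dict.empty, PySem.Dict.empty, PySem.Dict.empty)
  (st.1.items, st.2.1.items, st.2.2.items)

-- ===== PORT B =====
-- phase 1 of B: group a building under its BuildingType (groups.setdefault(t, []).append(building))
def pvStepB (g : PySem.Dict Int (List (List (String × Int)))) (building : List (String × Int)) :
    PySem.Dict Int (List (List (String × Int))) :=
  match pvGet building "BuildingType" with
  | some t => g.modify t [] (· ++ [building])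
  | none => g

-- one field's comprehension: [b[k] for b in group if b.get(k) is not None]
def pvF (k : String) : Int × List (List (String × Int)) → Int × List Int :=
  fun p => (p.1, p.2.filterMap (fun b => pvGet b k))

-- phase 2 of B for one field: the result dict, built key by key in groups order
def pvCollect (groups : PySem.Dict Int (List (List (String × Int)))) (k : String) : List (Int × List Int) :=
  groups.items.map (pvF k)

def get_vanilla_building_data_alt (vanilla_buildings : List (List (String × Int))) : (List (Int × List Int)) × (List (Int × List Int)) × (List (Int × List Int)) :=
  let groups := vanilla_buildings.foldl pvStepB PySem.Dict.empty
  (pvCollect groups "NameSeed", pvCollect groups "Quality", pvCollect groups "Sector")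

-- ===== PRECONDITION & SPEC =====
def Spec_get_vanilla_building_data (vanilla_buildings : List (List (String × Int))) (out : (List (Int × List Int)) × (List (Int × List Int)) × (List (Int × List Int))) : Prop := out = get_vanilla_building_data_alt vanilla_buildings
instance (vanilla_buildings : List (List (String × Int))) (out : (List (Int × List Int)) × (List (Int × List Int)) × (List (Int × List Int))) : Decidable (Spec_get_vanilla_building_data vanilla_buildings out) := by unfold Spec_get_vanilla_building_data; infer_instance

-- ===== CLAIM (what is proved, stated in full; the proofs are below) =====
def Claim_equal_get_vanilla_building_data : Prop := ∀ (vanilla_buildings : List (List (String × Int))), Dom_get_vanilla_building_data vanilla_buildings → Spec_get_vanilla_building_data vanilla_buildings (get_vanilla_building_data vanilla_buildings)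

-- ===== LEMMAS AND PROOFS =====

-- the invariant tying A's three accumulators to B's grouping accumulator
def pvRel (ns q se : PySem.Dict Int (List Int)) (g : PySem.Dict Int (List (List (String × Int)))) : Prop :=
  g.keys.Nodup ∧
  ns.items = g.items.map (pvF "NameSeed") ∧
  q.items = g.items.map (pvF "Quality") ∧
  se.items = g.items.map (pvF "Sector")

lemma pvKeys_of_items {ns : PySem.Dict Int (List Int)} {g : PySem.Dict Int (List (List (String × Int)))}
    {k : String} (h : ns.items = g.items.map (pvF k)) : ns.keys = g.keys := by
  simp only [PySem.Dict.keys, h, List.map_map]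
  rfl

lemma pvContains_of_items {ns : PySem.Dict Int (List Int)} {g : PySem.Dict Int (List (List (String × Int)))}
    {k : String} (h : ns.items = g.items.map (pvF k)) (t : Int) :
    ns.contains t = g.contains t := by
  rw [PySem.Dict.contains_eq_decide_mem_keys, PySem.Dict.contains_eq_decide_mem_keys,
    pvKeys_of_items h]

lemma pvModify_eq {κ ν : Type} [BEq κ] (d : PySem.Dict κ ν) (k : κ) (d0 : ν) (f : ν → ν) :
    d.modify k d0 f = d.insert k (f (d.getD k d0)) := rfl

-- one field's update in A's loop body matches B's grouping update, mapped through pvF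
lemma pvField_step (g : PySem.Dict Int (List (List (String × Int)))) (hn : g.keys.Nodup)
    (ns : PySem.Dict Int (List Int)) (k : String) (b : List (String × Int)) (t : Int)
    (h : ns.items = g.items.map (pvF k)) :
    (match pvGet b k with
     | some v => (if g.contains t then ns else ns.insert t []).modify t [] (· ++ [v])
     | none => (if g.contains t then ns else ns.insert t [])).items
      = (g.modify t [] (· ++ [b])).items.map (pvF k) := by
  have hnsc : ns.contains t = g.contains t := pvContains_of_items h t
  have hnsn : ns.keys.Nodup := (pvKeys_of_items h) ▸ hn
  rw [pvModify_eq g]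
  by_cases hc : g.contains t = true
  · -- the type is already grouped: A appends to the existing slot, B appends the building
    obtain ⟨bs, hbs⟩ : ∃ bs, (t, bs) ∈ g.items := by
      have ht : t ∈ g.keys := by
        have := (PySem.Dict.contains_iff_mem_keys (d := g) (k := t)).mp hc
        exact this
      simp only [PySem.Dict.keys, List.mem_map] at ht
      obtain ⟨p, hp, hpt⟩ := ht
      exact ⟨p.2, by simpa [← hpt] using hp⟩
    have hgD : g.getD t [] = bs := PySem.Dict.getD_of_mem_items g hbs hn []
    have hnsmem : (t, bs.filterMap (fun b => pvGet b k)) ∈ ns.items := by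
      rw [h]
      exact List.mem_map.mpr ⟨(t, bs), hbs, rfl⟩
    have hnsD : ns.getD t [] = bs.filterMap (fun b => pvGet b k) :=
      PySem.Dict.getD_of_mem_items ns hnsmem hnsn []
    have huniq : ∀ p ∈ g.items, p.1 = t → p = (t, bs) := by
      intro p hp hpt
      have := List.inj_on_of_nodup_map (f := Prod.fst) hn hp hbs (by simp [hpt])
      exact this
    rw [hgD, PySem.Dict.items_insert_of_contains _ _ hc]
    cases hget : pvGet b k with
    | none =>
      simp only [hc, if_true, h, List.map_map]
      apply List.map_congr_left
      intro p hp
      by_cases hpt : p.1 = t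
      · have hpe := huniq p hp hpt
        subst hpe
        simp [pvF, hget]
      · simp [pvF, hpt]
    | some v =>
      simp only [hc, if_true]
      rw [pvModify_eq, hnsD, PySem.Dict.items_insert_of_contains _ _ (hnsc.trans hc), h,
        List.map_map, List.map_map]
      apply List.map_congr_left
      intro p hp
      by_cases hpt : p.1 = t
      · have hpe := huniq p hp hpt
        subst hpe
        simp [pvF, hget]
      · simp [pvF, hpt]
  · -- a new type: A seeds empty lists then appends, B starts a fresh group
    have hc' : g.contains t = false := by simpa using hc
    have hnsc' : ns.contains t = false := hnsc.trans hc'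
    rw [PySem.Dict.getD_of_not_contains g [] hc', PySem.Dict.items_insert_of_not_contains _ _ hc']
    cases hget : pvGet b k with
    | none =>
      rw [if_neg (by simp [hc'])]
      rw [PySem.Dict.items_insert_of_not_contains _ _ hnsc', h, List.map_append]
      simp [pvF, hget]
    | some v =>
      rw [if_neg (by simp [hc'])]
      show ((ns.insert t []).modify t [] (fun x => x ++ [v])).items
        = List.map (pvF k) (g.items ++ [(t, [] ++ [b])])
      rw [pvModify_eq, PySem.Dict.getD_insert_self, PySem.Dict.insert_insert_self,
        PySem.Dict.items_insert_of_not_contains _ _ hnsc', h, List.map_append]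
      simp [pvF, hget]

lemma pvRel_step (ns q se : PySem.Dict Int (List Int)) (g : PySem.Dict Int (List (List (String × Int))))
    (b : List (String × Int)) (h : pvRel ns q se g) :
    pvRel (pvStepA (ns, q, se) b).1 (pvStepA (ns, q, se) b).2.1 (pvStepA (ns, q, se) b).2.2
      (pvStepB g b) := by
  obtain ⟨hn, h1, h2, h3⟩ := h
  cases hbt : pvGet b "BuildingType" with
  | none => simpa [pvStepA, pvStepB, hbt] using ⟨hn, h1, h2, h3⟩
  | some t =>
    have hnsc : ns.contains t = g.contains t := pvContains_of_items h1 t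
    have hkeep : ((if g.contains t then (ns, q, se)
        else (ns.insert t [], q.insert t [], se.insert t [])) :
        PySem.Dict Int (List Int) × PySem.Dict Int (List Int) × PySem.Dict Int (List Int)) =
        (if g.contains t then ns else ns.insert t [],
         if g.contains t then q else q.insert t [],
         if g.contains t then se else se.insert t []) := by
      by_cases hc : g.contains t = true <;> simp [hc]
    refine ⟨?_, ?_, ?_, ?_⟩
    · -- keys of the grouping stay nodup
      simp only [pvStepB, hbt, pvModify_eq]
      exact PySem.Dict.nodup_keys_insert _ _ _ hn
    all_goals
      simp only [pvStepA, pvStepB, hbt, hnsc, hkeep]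
    · exact pvField_step g hn ns "NameSeed" b t h1
    · exact pvField_step g hn q "Quality" b t h2
    · exact pvField_step g hn se "Sector" b t h3

lemma pvRel_fold (l : List (List (String × Int))) :
    ∀ (ns q se : PySem.Dict Int (List Int)) (g : PySem.Dict Int (List (List (String × Int)))),
      pvRel ns q se g →
      pvRel (l.foldl pvStepA (ns, q, se)).1 (l.foldl pvStepA (ns, q, se)).2.1
        (l.foldl pvStepA (ns, q, se)).2.2 (l.foldl pvStepB g) := by
  induction l with
  | nil => intro ns q se g h; simpa using h
  | cons b l ih =>
    intro ns q se g h
    have hstep := pvRel_step ns q se g b h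
    have := ih (pvStepA (ns, q, se) b).1 (pvStepA (ns, q, se) b).2.1
      (pvStepA (ns, q, se) b).2.2 (pvStepB g b) hstep
    simpa using this

-- ===== VERDICT (by name: the statement is the Claim_ definition above) =====
theorem get_vanilla_building_data_spec : Claim_equal_get_vanilla_building_data := by
  intro vb _
  unfold Spec_get_vanilla_building_data get_vanilla_building_data get_vanilla_building_data_alt
  have hrel : pvRel PySem.Dict.empty PySem.Dict.empty PySem.Dict.empty PySem.Dict.empty :=
    ⟨PySem.Dict.nodup_keys_empty, rfl, rfl, rfl⟩
  obtain ⟨_, h1, h2, h3⟩ := pvRel_fold vb _ _ _ _ hrel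
  simp only [pvCollect]
  exact Prod.ext h1 (Prod.ext h2 h3)
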